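-- pv_equiv track=rewrite | github.com/ronh991/Blender2P3DFSX | Blender2P3DFSX/func_util.py | SafeName
-- ===== SOURCE A (Python) =====
-- def SafeName(Name):
--     # Replaces each character in OldSet with NewChar
--     def ReplaceSet(String, OldSet, NewChar):
--         for OldChar in OldSet:
--             String = String.replace(OldChar, NewChar)
--         return String
--
--     import string
--
--     NewName = ReplaceSet(Name, string.punctuation + " ", "_")
--     if NewName[0].isdigit() or NewName in ["ARRAY", "DWORD", "UCHAR",
--                                            "FLOAT", "ULONGLONG", "BINARY_RESOURCE", "SDWORD", "UNICODE",
--                                            "CHAR", "STRING", "WORD", "CSTRING", "SWORD", "DOUBLE", "TEMPLATE"]: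
--         NewName = "_" + NewName
--     return NewName
-- ===== SOURCE B (Python) =====
-- def SafeName(Name):
--     import string
--     # translation table built once: every bad character maps to "_"
--     table = {c: "_" for c in string.punctuation + " "}
--     chars = []
--     for c in Name:
--         chars.append(table.get(c, c))
--     NewName = "".join(chars)
--     reserved = {"ARRAY", "DWORD", "UCHAR", "FLOAT", "ULONGLONG", "BINARY_RESOURCE",
--                 "SDWORD", "UNICODE", "CHAR", "STRING", "WORD", "CSTRING", "SWORD",
--                 "DOUBLE", "TEMPLATE"}
--     if NewName[0].isdigit() or NewName in reserved:
--         return "_" + NewName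
--     return NewName
-- ===== Notes on version B (the rewrite author's own statement) =====
-- stated objective: alternative
-- what changed: B builds a dict translation table (bad char -> '_') once and produces the sanitized name in one accumulator loop with a table lookup per character, with the reserved words held in a set and an early return, instead of A's 33 full-string str.replace passes (one per punctuation character) followed by a list membership test.
-- outside the precondition, e.g. on SafeName(''): A raises IndexError, B raises IndexError
import Mathlib
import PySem

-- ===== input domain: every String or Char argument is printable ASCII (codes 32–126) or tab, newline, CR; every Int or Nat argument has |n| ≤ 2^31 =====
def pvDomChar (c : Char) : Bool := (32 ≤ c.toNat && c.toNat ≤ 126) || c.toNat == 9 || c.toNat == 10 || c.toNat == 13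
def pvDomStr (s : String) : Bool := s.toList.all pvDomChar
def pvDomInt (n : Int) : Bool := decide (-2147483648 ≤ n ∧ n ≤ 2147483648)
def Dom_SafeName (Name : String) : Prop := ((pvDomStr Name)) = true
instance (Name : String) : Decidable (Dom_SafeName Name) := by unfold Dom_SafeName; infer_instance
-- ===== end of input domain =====

-- B builds a dict translation table (bad char -> '_') once and sanitizes in one accumulator
-- loop with a per-character table lookup, with the reserved words in a set and early returns,
-- instead of A's 33 full-string replace passes plus a list membership test (alternative).

-- ===== PORT A =====
-- string.punctuation + " "
def pvOldSetA : List Char := "!\"#$%&'()*+,-./:;<=>?@[\\]^_`{|}~ ".toList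

def pvReservedA : List (List Char) :=
  ["ARRAY".toList, "DWORD".toList, "UCHAR".toList,
   "FLOAT".toList, "ULONGLONG".toList, "BINARY_RESOURCE".toList, "SDWORD".toList, "UNICODE".toList,
   "CHAR".toList, "STRING".toList, "WORD".toList, "CSTRING".toList, "SWORD".toList, "DOUBLE".toList,
   "TEMPLATE".toList]

-- ReplaceSet: one String.replace pass per character of OldSet
def pvReplaceSetA (s : List Char) (oldSet : List Char) (newChar : Char) : List Char :=
  oldSet.foldl (fun s oldChar => PySem.Chars.replace s [oldChar] [newChar]) s

def SafeName (Name : String) : String :=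
  let newName := pvReplaceSetA Name.toList pvOldSetA '_'
  -- NewName[0] raises IndexError on the empty string: that input is excluded by Pre_SafeName
  if ((PySem.List.pyGet? newName 0).elim false PySem.Chars.isdigit) || pvReservedA.contains newName
  then String.ofList ('_' :: newName) else String.ofList newName

-- ===== PORT B =====
-- table = {c: "_" for c in string.punctuation + " "}
def pvTableB : PySem.Dict Char Char :=
  "!\"#$%&'()*+,-./:;<=>?@[\\]^_`{|}~ ".toList.foldl (fun d c => d.insert c '_') PySem.Dict.empty

-- the for-loop appending table.get(c, c) for each character
def pvSanitizeB : List Char → List Char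
  | [] => []
  | c :: rest => pvTableB.getD c c :: pvSanitizeB rest

-- reserved = {...}, a set
def pvReservedB : PySem.Set (List Char) :=
  PySem.Set.ofList
    ["ARRAY".toList, "DWORD".toList, "UCHAR".toList,
     "FLOAT".toList, "ULONGLONG".toList, "BINARY_RESOURCE".toList, "SDWORD".toList, "UNICODE".toList,
     "CHAR".toList, "STRING".toList, "WORD".toList, "CSTRING".toList, "SWORD".toList, "DOUBLE".toList,
     "TEMPLATE".toList]

def SafeName_alt (Name : String) : String :=
  match pvSanitizeB Name.toList with
  | [] => ""  -- NewName[0] raises IndexError on the empty string (outside Pre_SafeName)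
  | c :: rest =>
    if PySem.Chars.isdigit c || pvReservedB.contains (c :: rest)
    then String.ofList ('_' :: c :: rest)
    else String.ofList (c :: rest)

-- ===== PRECONDITION & SPEC =====
-- Pre_ excludes only the empty string, on which A's NewName[0] raises IndexError.
def Pre_SafeName (Name : String) : Prop := Name ≠ ""
instance (Name : String) : Decidable (Pre_SafeName Name) := by unfold Pre_SafeName; infer_instance
def pvWitness_SafeName : String := "a b"

def Spec_SafeName (Name : String) (out : String) : Prop := out = SafeName_alt Name
instance (Name : String) (out : String) : Decidable (Spec_SafeName Name out) := by unfold Spec_SafeName; infer_instance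

-- ===== CLAIM (what is proved, stated in full; the proofs are below) =====
def Claim_equal_SafeName : Prop := ∀ (Name : String), Dom_SafeName Name → Pre_SafeName Name → Spec_SafeName Name (SafeName Name)

-- ===== LEMMAS AND PROOFS =====

-- one single-char replace pass is a pointwise map
theorem pvReplaceGoSingle (c d : Char) :
    ∀ (fuel : Nat) (l acc : List Char), l.length ≤ fuel →
      PySem.Chars.replace.go [c] [d] fuel l acc
        = acc.reverse ++ l.map (fun x => if x = c then d else x) := by
  intro fuel
  induction fuel with
  | zero =>
    intro l acc h
    have : l = [] := List.eq_nil_of_length_eq_zero (Nat.le_zero.mp h)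
    subst this; simp [PySem.Chars.replace.go]
  | succ n ih =>
    intro l acc h
    cases l with
    | nil => simp [PySem.Chars.replace.go]
    | cons x t =>
      by_cases hx : x = c
      · subst hx
        have : [x].isPrefixOf (x :: t) = true := by simp [List.isPrefixOf]
        simp only [PySem.Chars.replace.go, this, if_pos]
        rw [show List.drop [x].length (x :: t) = t from rfl,
            show ([d].reverse ++ acc) = d :: acc from rfl,
            ih t _ (by simpa using Nat.le_of_succ_le_succ h)]
        simp
      · have : [c].isPrefixOf (x :: t) = false := by
          simp [List.isPrefixOf]; exact fun hh => absurd hh.symm hx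
        simp only [PySem.Chars.replace.go, this, Bool.false_eq_true, if_false]
        rw [ih t _ (by simpa using Nat.le_of_succ_le_succ h)]
        simp [hx]

theorem pvReplaceSingle (c d : Char) (s : List Char) :
    PySem.Chars.replace s [c] [d] = s.map (fun x => if x = c then d else x) := by
  simp [PySem.Chars.replace]
  rw [pvReplaceGoSingle c d s.length s [] le_rfl]
  simp

-- folding single-char replaces = map of the folded per-char function
theorem pvFoldReplaceMap (d : Char) :
    ∀ (l : List Char) (s : List Char),
      l.foldl (fun s c => PySem.Chars.replace s [c] [d]) s
        = s.map (fun x => l.foldl (fun y c => if y = c then d else y) x) := by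
  intro l
  induction l with
  | nil => intro s; simp
  | cons c t ih =>
    intro s
    simp only [List.foldl_cons]
    rw [pvReplaceSingle, ih, List.map_map]
    rfl

-- sequential per-char substitution is plain membership: once the value becomes '_' it stays '_'
theorem pvPerCharFold :
    ∀ (l : List Char) (x : Char),
      l.foldl (fun y c => if y = c then '_' else y) x = if x ∈ l then '_' else x := by
  intro l
  induction l with
  | nil => intro x; simp
  | cons c t ih =>
    intro x
    have us : t.foldl (fun y c => if y = c then '_' else y) '_' = '_' := by
      rw [ih]; split <;> rfl
    by_cases hx : x = c
    · subst hx; simp [us]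
    · simp only [List.foldl_cons, if_neg hx, ih]
      simp [List.mem_cons, hx]

-- a dict built by inserting the constant '_' for every key of l looks up as membership in l
theorem pvTableLookup :
    ∀ (l : List Char) (d : PySem.Dict Char Char) (x : Char),
      (l.foldl (fun d c => d.insert c '_') d).getD x x = if x ∈ l then '_' else d.getD x x := by
  intro l
  induction l with
  | nil => intro d x; simp
  | cons c t ih =>
    intro d x
    simp only [List.foldl_cons]
    rw [ih]
    by_cases hx : x ∈ t
    · simp [hx]
    · rw [if_neg hx, PySem.Dict.getD_insert]
      by_cases hc : x = c <;> simp [hc, List.mem_cons, hx]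

-- B's sanitizing loop is the same pointwise map
theorem pvSanitizeMap (cs : List Char) :
    pvSanitizeB cs = cs.map (fun x => if x ∈ pvOldSetA then '_' else x) := by
  induction cs with
  | nil => rfl
  | cons c t ih =>
    simp only [pvSanitizeB, List.map_cons, ih]
    congr 1
    rw [show pvTableB = (pvOldSetA.foldl (fun d c => d.insert c '_') PySem.Dict.empty) from rfl,
        pvTableLookup]
    split <;> simp [PySem.Dict.getD_empty]

-- the two sanitized lists coincide
theorem pvListsEq (cs : List Char) :
    pvReplaceSetA cs pvOldSetA '_' = pvSanitizeB cs := by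
  unfold pvReplaceSetA
  rw [pvFoldReplaceMap, pvSanitizeMap]
  apply List.map_congr_left
  intro x _
  rw [pvPerCharFold pvOldSetA x]

-- the reserved-word set is the reserved-word list (the literals are distinct)
theorem pvReservedEq (l : List Char) : pvReservedB.contains l = pvReservedA.contains l := by
  have h : pvReservedB = pvReservedA := by decide
  rw [h, PySem.Set.contains_eq_listContains]

-- ===== VERDICT (by name: the statement is the Claim_ definition above) =====
theorem SafeName_spec : Claim_equal_SafeName := by
  intro Name _ hpre
  unfold Spec_SafeName SafeName SafeName_alt
  rw [pvListsEq]
  have hne : Name.toList ≠ [] := fun h => hpre (String.toList_eq_nil_iff.mp h)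
  obtain ⟨c, t, hct⟩ := List.exists_cons_of_ne_nil hne
  rw [hct]
  cases h : pvSanitizeB (c :: t) with
  | nil => simp [pvSanitizeB] at h
  | cons y ys =>
    simp only [h]
    rw [pvReservedEq]
    simp [PySem.List.pyGet?, PySem.List.pyIdx?]
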